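-- pv_equiv track=rewrite | github.com/anna-hope/signify | substrings.py | get_top_ltr_rtl
-- ===== SOURCE A (Python) =====
-- from collections import Counter, defaultdict
--
-- def get_top_ltr_rtl(common_substrings, right_to_left, verbose=False):
--     top_ltr = defaultdict(set)
--     top_rtl = {}
--     for stem, its_substrings in right_to_left.items():
--         # some of the stems might point to no affixes
--         if len(its_substrings) > 1:
--
--             # keep only the associated substrings which are frequent enough
--             only_top_substrings = []
--             for substring in its_substrings:
--                 if substring in common_substrings:
--                     only_top_substrings.append(substring)
--
--             #
--             # if sum(len(substring) for substring in only_top_substrings) > min_length * 3: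
--             if len(only_top_substrings) > 1:
--                 top_rtl[stem] = only_top_substrings
--
--
--                 for affix in only_top_substrings:
--                     # add the related stems for every top affix to the affixes to stems dictionary
--                     top_ltr[affix].add(stem)
--
--     return top_rtl, top_ltr
-- ===== SOURCE B (Python) =====
-- from collections import Counter, defaultdict
--
-- def get_top_ltr_rtl(common_substrings, right_to_left, verbose=False):
--     # Relational formulation: flatten the mapping into a (stem, affix) edge list
--     # keeping only frequent affixes, count edges per stem once with a Counter,
--     # and derive both output dictionaries by grouping the qualifying edges.
--     edges = [(stem, substring)
--              for stem, its_substrings in right_to_left.items()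
--              if len(its_substrings) > 1
--              for substring in its_substrings
--              if substring in common_substrings]
--     edges_per_stem = Counter(stem for stem, _ in edges)
--     top_rtl = {}
--     top_ltr = defaultdict(set)
--     for stem, affix in edges:
--         if edges_per_stem[stem] > 1:
--             top_rtl.setdefault(stem, []).append(affix)
--             top_ltr[affix].add(stem)
--     return top_rtl, top_ltr
-- ===== Notes on version B (the rewrite author's own statement) =====
-- stated objective: alternative
-- what changed: A nests a per-stem filter loop inside the main loop and updates both dictionaries as it filters; B is relational: it flattens the mapping into a (stem, affix) edge list, counts edges per stem once with a Counter, and then derives top_rtl and top_ltr by grouping the edges whose stem has more than one edge.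
import Mathlib
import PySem

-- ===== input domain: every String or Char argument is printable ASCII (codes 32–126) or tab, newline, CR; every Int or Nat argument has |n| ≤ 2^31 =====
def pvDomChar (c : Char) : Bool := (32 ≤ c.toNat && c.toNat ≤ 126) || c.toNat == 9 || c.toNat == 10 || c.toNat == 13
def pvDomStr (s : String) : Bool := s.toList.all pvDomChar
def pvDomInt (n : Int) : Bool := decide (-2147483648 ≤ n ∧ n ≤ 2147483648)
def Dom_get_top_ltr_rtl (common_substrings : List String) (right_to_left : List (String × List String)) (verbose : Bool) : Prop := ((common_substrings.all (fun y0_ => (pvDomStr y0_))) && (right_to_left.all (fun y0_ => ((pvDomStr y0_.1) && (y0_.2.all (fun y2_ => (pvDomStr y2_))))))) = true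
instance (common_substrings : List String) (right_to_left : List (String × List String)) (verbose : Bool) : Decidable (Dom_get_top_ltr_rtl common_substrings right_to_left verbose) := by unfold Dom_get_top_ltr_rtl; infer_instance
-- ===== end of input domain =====

-- B is a relational reformulation: it flattens the mapping into a (stem, affix) edge
-- list, counts edges per stem once with a Counter, and derives both dictionaries by
-- grouping the qualifying edges (A nests a per-stem filter loop and updates both
-- dictionaries as it goes).

-- ===== PORT A =====
def get_top_ltr_rtl (common_substrings : List String) (right_to_left : List (String × List String)) (verbose : Bool) : (List (String × List String)) × (List (String × List String)) :=
  let st := right_to_left.foldl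
    (fun (st : PySem.Dict String (List String) × PySem.Dict String (PySem.Set String)) p =>
      if p.2.length > 1 then
        let only_top_substrings :=
          p.2.foldl (fun acc s => if common_substrings.contains s then acc ++ [s] else acc) []
        if only_top_substrings.length > 1 then
          (st.1.insert p.1 only_top_substrings,
           only_top_substrings.foldl
             (fun d affix => d.modify affix PySem.Set.empty (fun s => PySem.Set.add s p.1)) st.2)
        else st
      else st)
    (PySem.Dict.empty, PySem.Dict.empty)
  (st.1.items, st.2.items)

-- ===== PORT B =====
-- the body of Source B's edge-list comprehension (one entry's qualifying edges)
def pvEdgeF (common_substrings : List String) (p : String × List String) : List (String × String) :=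
  if p.2.length > 1 then
    (p.2.filter (fun s => common_substrings.contains s)).map (fun s => (p.1, s))
  else []

def get_top_ltr_rtl_alt (common_substrings : List String) (right_to_left : List (String × List String)) (verbose : Bool) : (List (String × List String)) × (List (String × List String)) :=
  let edges := right_to_left.flatMap (fun p => pvEdgeF common_substrings p)
  let edges_per_stem := PySem.Dict.counter (edges.map Prod.fst)
  let st := edges.foldl
    (fun (st : PySem.Dict String (List String) × PySem.Dict String (PySem.Set String)) e =>
      if edges_per_stem.getD e.1 0 > 1 then
        (st.1.modify e.1 [] (fun l => l ++ [e.2]),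
         st.2.modify e.2 PySem.Set.empty (fun s => PySem.Set.add s e.1))
      else st)
    (PySem.Dict.empty, PySem.Dict.empty)
  (st.1.items, st.2.items)

-- ===== PRECONDITION & SPEC =====
-- Pre_ excludes right_to_left lists with duplicate stem keys: A's parameter is a Python
-- dict, which cannot hold duplicate keys, so such association lists do not represent any
-- Python input and their behaviour is an artefact of the list encoding.
def Pre_get_top_ltr_rtl (common_substrings : List String) (right_to_left : List (String × List String)) (verbose : Bool) : Prop :=
  (right_to_left.map Prod.fst).Nodup
instance (common_substrings : List String) (right_to_left : List (String × List String)) (verbose : Bool) : Decidable (Pre_get_top_ltr_rtl common_substrings right_to_left verbose) := by unfold Pre_get_top_ltr_rtl; infer_instance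

def pvWitness_get_top_ltr_rtl : List String × (List (String × List String)) × Bool :=
  (["ab", "cd"], [("s1", ["ab", "cd"]), ("s2", ["ab"])], false)

def Spec_get_top_ltr_rtl (common_substrings : List String) (right_to_left : List (String × List String)) (verbose : Bool) (out : (List (String × List String)) × (List (String × List String))) : Prop := out = get_top_ltr_rtl_alt common_substrings right_to_left verbose
instance (common_substrings : List String) (right_to_left : List (String × List String)) (verbose : Bool) (out : (List (String × List String)) × (List (String × List String))) : Decidable (Spec_get_top_ltr_rtl common_substrings right_to_left verbose out) := by unfold Spec_get_top_ltr_rtl; infer_instance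

-- ===== CLAIM (what is proved, stated in full; the proofs are below) =====
def Claim_equal_get_top_ltr_rtl : Prop := ∀ (common_substrings : List String) (right_to_left : List (String × List String)) (verbose : Bool), Dom_get_top_ltr_rtl common_substrings right_to_left verbose → Pre_get_top_ltr_rtl common_substrings right_to_left verbose → Spec_get_top_ltr_rtl common_substrings right_to_left verbose (get_top_ltr_rtl common_substrings right_to_left verbose)

-- ===== LEMMAS AND PROOFS =====

-- the accepted (stem, filtered substrings) entries, in input order
def pvAccepted (cs : List String) (rtl : List (String × List String)) : List (String × List String) :=
  rtl.filterMap (fun p =>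
    if p.2.length > 1 then
      if (p.2.filter (fun s => cs.contains s)).length > 1 then
        some (p.1, p.2.filter (fun s => cs.contains s))
      else none
    else none)

-- the edges of a grouped association list, flattened
def pvE (L : List (String × List String)) : List (String × String) :=
  L.flatMap (fun q => q.2.map (fun s => (q.1, s)))

-- A's inner top_ltr loop, hoisted out as a fold over grouped entries
def pvInvert (l : List (String × List String)) (e : PySem.Dict String (PySem.Set String)) : PySem.Dict String (PySem.Set String) :=
  l.foldl (fun d q =>
    q.2.foldl (fun d affix => d.modify affix PySem.Set.empty (fun s => PySem.Set.add s q.1)) d) e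

theorem pvAccepted_cons (cs : List String) (p : String × List String) (rest : List (String × List String)) :
    pvAccepted cs (p :: rest) =
      (if p.2.length > 1 then
        if (p.2.filter (fun s => cs.contains s)).length > 1 then
          (p.1, p.2.filter (fun s => cs.contains s)) :: pvAccepted cs rest
        else pvAccepted cs rest
      else pvAccepted cs rest) := by
  by_cases h1 : p.2.length > 1
  · by_cases h2 : (p.2.filter (fun s => cs.contains s)).length > 1
    · rw [if_pos h1, if_pos h2]
      unfold pvAccepted
      rw [List.filterMap_cons, if_pos h1, if_pos h2]
    · rw [if_pos h1, if_neg h2]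
      unfold pvAccepted
      rw [List.filterMap_cons, if_pos h1, if_neg h2]
  · rw [if_neg h1]
    unfold pvAccepted
    rw [List.filterMap_cons, if_neg h1]

theorem pvA_fold_eq (cs : List String) (rtl : List (String × List String))
    (d : PySem.Dict String (List String)) (e : PySem.Dict String (PySem.Set String)) :
    rtl.foldl
      (fun (st : PySem.Dict String (List String) × PySem.Dict String (PySem.Set String)) p =>
        if p.2.length > 1 then
          let only := p.2.foldl (fun acc s => if cs.contains s then acc ++ [s] else acc) []
          if only.length > 1 then
            (st.1.insert p.1 only,
             only.foldl (fun d affix => d.modify affix PySem.Set.empty (fun s => PySem.Set.add s p.1)) st.2)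
          else st
        else st)
      (d, e)
    = ((pvAccepted cs rtl).foldl (fun d q => d.insert q.1 q.2) d, pvInvert (pvAccepted cs rtl) e) := by
  induction rtl generalizing d e with
  | nil => rfl
  | cons p rest ih =>
    rw [List.foldl_cons, pvAccepted_cons]
    simp only
    rw [PySem.List.foldl_append_if_eq_filter, List.nil_append]
    by_cases h1 : p.2.length > 1
    · rw [if_pos h1, if_pos h1]
      by_cases h2 : (p.2.filter (fun s => cs.contains s)).length > 1
      · rw [if_pos h2, if_pos h2, ih]
        rw [List.foldl_cons]
        unfold pvInvert
        rw [List.foldl_cons]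
      · rw [if_neg h2, if_neg h2]
        exact ih d e
    · rw [if_neg h1, if_neg h1]
      exact ih d e

theorem pvAccepted_keys_sublist (cs : List String) (rtl : List (String × List String)) :
    ((pvAccepted cs rtl).map Prod.fst).Sublist (rtl.map Prod.fst) := by
  induction rtl with
  | nil => simp [pvAccepted]
  | cons p rest ih =>
    rw [pvAccepted_cons, List.map_cons]
    by_cases h1 : p.2.length > 1
    · by_cases h2 : (p.2.filter (fun s => cs.contains s)).length > 1
      · rw [if_pos h1, if_pos h2, List.map_cons]
        exact ih.cons₂ p.1
      · rw [if_pos h1, if_neg h2]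
        exact ih.cons _
    · rw [if_neg h1]
      exact ih.cons _

theorem pvMem_pvAccepted_snd {cs : List String} {rtl : List (String × List String)}
    {q : String × List String} (hq : q ∈ pvAccepted cs rtl) : 1 < q.2.length := by
  rcases List.mem_filterMap.mp hq with ⟨p, _, hp⟩
  by_cases h1 : p.2.length > 1
  · by_cases h2 : (p.2.filter (fun s => cs.contains s)).length > 1
    · rw [if_pos h1, if_pos h2] at hp
      cases hp
      simpa using h2
    · rw [if_pos h1, if_neg h2] at hp; cases hp
  · rw [if_neg h1] at hp; cases hp

theorem pvFoldl_insert_items (l : List (String × List String)) (d : PySem.Dict String (List String))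
    (hnd : (l.map Prod.fst).Nodup) (hfresh : ∀ k ∈ l.map Prod.fst, d.contains k = false) :
    (l.foldl (fun d q => d.insert q.1 q.2) d).items = d.items ++ l := by
  induction l generalizing d with
  | nil => simp
  | cons q rest ih =>
    simp only [List.foldl_cons]
    have hq : d.contains q.1 = false := hfresh q.1 (by simp)
    have hrest : ∀ k ∈ rest.map Prod.fst, (d.insert q.1 q.2).contains k = false := by
      intro k hk
      rw [PySem.Dict.contains_insert]
      have hne : k ≠ q.1 := by
        intro he; exact (List.nodup_cons.mp (by simpa using hnd)).1 (he ▸ hk)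
      simp [hne, hfresh k (by simp [hk])]
    rw [ih (d.insert q.1 q.2) (by simpa using (List.nodup_cons.mp (by simpa using hnd)).2) hrest,
        PySem.Dict.items_insert_of_not_contains _ _ hq]
    simp

-- a fold of a pair with a shared guard splits into two guarded folds
theorem pvFoldPairIf {ε α β : Type} (c : ε → Prop) [DecidablePred c]
    (f : α → ε → α) (g : β → ε → β) :
    ∀ (l : List ε) (a0 : α) (b0 : β),
      l.foldl (fun (st : α × β) e => if c e then (f st.1 e, g st.2 e) else st) (a0, b0)
        = (l.foldl (fun a e => if c e then f a e else a) a0,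
           l.foldl (fun b e => if c e then g b e else b) b0) := by
  intro l
  induction l with
  | nil => intro a0 b0; rfl
  | cons e rest ih =>
    intro a0 b0
    by_cases h : c e <;> simp [h, ih]

-- a guarded fold is the fold over the filtered list
theorem pvFoldIf {ε α : Type} (c : ε → Prop) [DecidablePred c] (f : α → ε → α) :
    ∀ (l : List ε) (a0 : α),
      l.foldl (fun a e => if c e then f a e else a) a0
        = (l.filter (fun e => decide (c e))).foldl f a0 := by
  intro l
  induction l with
  | nil => intro a0; rfl
  | cons e rest ih =>
    intro a0
    by_cases h : c e <;> simp [h, ih]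

theorem pvEdgeF_map_fst (cs : List String) (p : String × List String) :
    (pvEdgeF cs p).map Prod.fst = List.replicate (pvEdgeF cs p).length p.1 := by
  unfold pvEdgeF
  split
  · simp [List.map_map, Function.comp_def, List.map_const']
  · rfl

theorem pvCount_edges (cs : List String) :
    ∀ (rtl : List (String × List String)), (rtl.map Prod.fst).Nodup →
      ∀ p ∈ rtl,
        ((rtl.flatMap (fun q => pvEdgeF cs q)).map Prod.fst).count p.1 = (pvEdgeF cs p).length := by
  intro rtl
  induction rtl with
  | nil => intro _ p hp; cases hp
  | cons q rest ih =>
    intro hnd p hp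
    rw [List.map_cons] at hnd
    obtain ⟨hq1, hrestnd⟩ := List.nodup_cons.mp hnd
    rw [List.flatMap_cons, List.map_append, List.count_append, pvEdgeF_map_fst]
    have hrestfst : ∀ x ∈ (rest.flatMap (fun r => pvEdgeF cs r)).map Prod.fst,
        x ∈ rest.map Prod.fst := by
      intro x hx
      rcases List.mem_map.mp hx with ⟨e, he, hex⟩
      rcases List.mem_flatMap.mp he with ⟨r, hr, her⟩
      have hfst : e.1 = r.1 := by
        unfold pvEdgeF at her
        split at her
        · rcases List.mem_map.mp her with ⟨s, _, hs⟩
          cases hs; rfl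
        · cases her
      exact List.mem_map.mpr ⟨r, hr, by rw [← hex, hfst]⟩
    rcases List.mem_cons.mp hp with rfl | hp
    · rw [List.count_replicate, if_pos (by simp)]
      have hnot : p.1 ∉ (rest.flatMap (fun r => pvEdgeF cs r)).map Prod.fst := by
        intro hmem
        exact hq1 (hrestfst _ hmem)
      rw [List.count_eq_zero.mpr hnot]
      simp
    · have hne : q.1 ≠ p.1 := by
        intro he
        exact hq1 (he ▸ List.mem_map.mpr ⟨p, hp, rfl⟩)
      rw [List.count_replicate, if_neg (by simpa using hne)]
      rw [ih hrestnd p hp]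
      simp

theorem pvFilter_edges (cs : List String) (cnt : String → Int) :
    ∀ (rtl : List (String × List String)),
      (∀ p ∈ rtl, cnt p.1 = ((pvEdgeF cs p).length : Int)) →
      (rtl.flatMap (fun q => pvEdgeF cs q)).filter (fun e => decide (cnt e.1 > 1))
        = pvE (pvAccepted cs rtl) := by
  intro rtl
  induction rtl with
  | nil => intro _; rfl
  | cons p rest ih =>
    intro h
    have hp : cnt p.1 = ((pvEdgeF cs p).length : Int) := h p (by simp)
    have hrest := fun r hr => h r (List.mem_cons_of_mem _ hr)
    rw [List.flatMap_cons, List.filter_append, pvAccepted_cons, ih hrest]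
    have hfst : ∀ e ∈ pvEdgeF cs p, e.1 = p.1 := by
      intro e he
      unfold pvEdgeF at he
      split at he
      · rcases List.mem_map.mp he with ⟨s, _, hs⟩; cases hs; rfl
      · cases he
    by_cases h1 : p.2.length > 1
    · have hlen : (pvEdgeF cs p).length = (p.2.filter (fun s => cs.contains s)).length := by
        unfold pvEdgeF; rw [if_pos h1, List.length_map]
      by_cases h2 : (p.2.filter (fun s => cs.contains s)).length > 1
      · rw [if_pos h1, if_pos h2]
        have hkeep : (pvEdgeF cs p).filter (fun e => decide (cnt e.1 > 1)) = pvEdgeF cs p := by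
          apply List.filter_eq_self.mpr
          intro e he
          rw [hfst e he]
          simp only [decide_eq_true_eq]
          rw [hp, hlen]
          exact_mod_cast h2
        rw [hkeep]
        unfold pvE
        rw [List.flatMap_cons]
        unfold pvEdgeF
        rw [if_pos h1]
      · rw [if_pos h1, if_neg h2]
        have hdrop : (pvEdgeF cs p).filter (fun e => decide (cnt e.1 > 1)) = [] := by
          apply List.filter_eq_nil_iff.mpr
          intro e he
          rw [hfst e he]
          simp only [decide_eq_true_eq, not_lt]
          rw [hp, hlen]
          exact_mod_cast Nat.not_lt.mp h2
        rw [hdrop, List.nil_append]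
    · rw [if_neg h1]
      have hnil : pvEdgeF cs p = [] := by unfold pvEdgeF; rw [if_neg h1]
      rw [hnil]
      rfl

theorem pvOfList_runs :
    ∀ (L : List (String × List String)), (L.map Prod.fst).Nodup →
      (∀ q ∈ L, q.2 ≠ []) →
      PySem.Set.ofList ((pvE L).map Prod.fst) = L.map Prod.fst := by
  intro L
  induction L with
  | nil => intro _ _; rfl
  | cons q rest ih =>
    intro hnd hne
    rw [List.map_cons] at hnd
    obtain ⟨hq1, hrestnd⟩ := List.nodup_cons.mp hnd
    unfold pvE
    rw [List.flatMap_cons, List.map_append]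
    have hq2 : (q.2.map (fun s => (q.1, s))).map Prod.fst = List.replicate q.2.length q.1 := by
      simp [List.map_map, Function.comp_def]
    rw [hq2, PySem.Set.ofList_append, PySem.Set.update_eq_append_filter]
    have hrest : PySem.Set.ofList ((pvE rest).map Prod.fst) = rest.map Prod.fst :=
      ih hrestnd (fun r hr => hne r (List.mem_cons_of_mem _ hr))
    unfold pvE at hrest
    have hlen : q.2.length ≠ 0 := by
      intro h0
      exact hne q (by simp) (List.eq_nil_of_length_eq_zero h0)
    obtain ⟨m, hm⟩ : ∃ m, q.2.length = m + 1 := by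
      cases hq : q.2.length with
      | zero => exact absurd hq hlen
      | succ m => exact ⟨m, rfl⟩
    have hrep : PySem.Set.ofList (List.replicate q.2.length q.1) = [q.1] := by
      rw [hm]
      clear hm
      induction m with
      | zero => rfl
      | succ k ihk =>
        rw [List.replicate_succ, PySem.Set.ofList_cons, ihk]
        simp [PySem.Set.discard]
    rw [hrep, hrest]
    have hkeep : (rest.map Prod.fst).filter (fun y => !(PySem.Set.contains [q.1] y)) = rest.map Prod.fst := by
      apply List.filter_eq_self.mpr
      intro y hy
      have hyne : y ≠ q.1 := by
        intro he; exact hq1 (he ▸ hy)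
      simp [PySem.Set.contains, hyne]
    rw [hkeep]
    rfl

theorem pvE_filter_eq :
    ∀ (L : List (String × List String)), (L.map Prod.fst).Nodup →
      ∀ q ∈ L, ((pvE L).filter (fun e => e.1 == q.1)).map (fun x => x.2) = q.2 := by
  intro L
  induction L with
  | nil => intro _ q hq; cases hq
  | cons r rest ih =>
    intro hnd q hq
    rw [List.map_cons] at hnd
    obtain ⟨hr1, hrestnd⟩ := List.nodup_cons.mp hnd
    unfold pvE
    rw [List.flatMap_cons, List.filter_append, List.map_append]
    rcases List.mem_cons.mp hq with rfl | hq
    · have h1 : (q.2.map (fun s => (q.1, s))).filter (fun e => e.1 == q.1) = q.2.map (fun s => (q.1, s)) := by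
        apply List.filter_eq_self.mpr
        intro e he
        rcases List.mem_map.mp he with ⟨s, _, hs⟩
        cases hs; simp
      have h2 : ((rest.flatMap (fun q => q.2.map (fun s => (q.1, s)))).filter (fun e => e.1 == q.1)) = [] := by
        apply List.filter_eq_nil_iff.mpr
        intro e he
        rcases List.mem_flatMap.mp he with ⟨r', hr', her'⟩
        rcases List.mem_map.mp her' with ⟨s, _, hs⟩
        cases hs
        have hne : r'.1 ≠ q.1 := by
          intro heq
          exact hr1 (heq ▸ List.mem_map.mpr ⟨r', hr', rfl⟩)
        simpa using hne
      rw [h1, h2]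
      simp [List.map_map, Function.comp_def]
    · have hne : r.1 ≠ q.1 := by
        intro he
        exact hr1 (he ▸ List.mem_map.mpr ⟨q, hq, rfl⟩)
      have h1 : (r.2.map (fun s => (r.1, s))).filter (fun e => e.1 == q.1) = [] := by
        apply List.filter_eq_nil_iff.mpr
        intro e he
        rcases List.mem_map.mp he with ⟨s, _, hs⟩
        cases hs
        simpa using hne
      rw [h1]
      simp only [List.map_nil, List.nil_append]
      have hih := ih hrestnd q hq
      unfold pvE at hih
      exact hih

-- B's grouped top_rtl fold over the accepted edges produces exactly the accepted entries
theorem pvGroup_items (L : List (String × List String))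
    (hnd : (L.map Prod.fst).Nodup) (hne : ∀ q ∈ L, q.2 ≠ []) :
    ((pvE L).foldl (fun d e => d.modify e.1 [] (fun l => l ++ [e.2])) PySem.Dict.empty).items = L := by
  set dB := (pvE L).foldl (fun d e => d.modify e.1 [] (fun l => l ++ [e.2])) PySem.Dict.empty with hdB
  have hkeys : dB.keys = L.map Prod.fst := by
    rw [hdB, PySem.Dict.keys_foldl_modify_key (pvE L) Prod.fst [] (fun _ e l => l ++ [e.2])]
    rw [show (PySem.Dict.empty : PySem.Dict String (List String)).keys = [] from rfl]
    rw [PySem.Set.update_nil_left]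
    exact pvOfList_runs L hnd hne
  have hndk : dB.keys.Nodup := by rw [hkeys]; exact hnd
  have hgetD : ∀ q ∈ L, dB.getD q.1 [] = q.2 := by
    intro q hq
    rw [hdB, PySem.Dict.getD_foldl_modify_append]
    rw [show (PySem.Dict.empty : PySem.Dict String (List String)).getD q.1 [] = [] from rfl]
    rw [List.nil_append]
    exact pvE_filter_eq L hnd q hq
  rw [PySem.Dict.items_eq_map_keys dB hndk [], hkeys, List.map_map]
  calc L.map ((fun k => (k, dB.getD k [])) ∘ Prod.fst)
      = L.map (fun q => (q.1, q.2)) := by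
        apply List.map_congr_left
        intro q hq
        simp only [Function.comp]
        rw [hgetD q hq]
    _ = L := by simp

-- B's top_ltr fold over the accepted edges is A's nested inversion loop
theorem pvLtr_fold (L : List (String × List String)) (d : PySem.Dict String (PySem.Set String)) :
    (pvE L).foldl (fun d e => d.modify e.2 PySem.Set.empty (fun s => PySem.Set.add s e.1)) d
      = pvInvert L d := by
  induction L generalizing d with
  | nil => rfl
  | cons q rest ih =>
    unfold pvE
    rw [List.flatMap_cons, List.foldl_append]
    unfold pvInvert
    rw [List.foldl_cons]
    rw [List.foldl_map]
    exact ih _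

-- ===== VERDICT (by name: the statement is the Claim_ definition above) =====
theorem get_top_ltr_rtl_spec : Claim_equal_get_top_ltr_rtl := by
  intro cs rtl verbose _ hpre
  unfold Spec_get_top_ltr_rtl
  simp only [get_top_ltr_rtl, get_top_ltr_rtl_alt]
  rw [pvA_fold_eq]
  have hndacc : ((pvAccepted cs rtl).map Prod.fst).Nodup :=
    (pvAccepted_keys_sublist cs rtl).nodup hpre
  have hneacc : ∀ q ∈ pvAccepted cs rtl, q.2 ≠ [] := by
    intro q hq h0
    have hlen := pvMem_pvAccepted_snd hq
    rw [h0] at hlen; simp at hlen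
  have hitemsA : ((pvAccepted cs rtl).foldl (fun d q => d.insert q.1 q.2) PySem.Dict.empty).items
      = pvAccepted cs rtl := by
    rw [pvFoldl_insert_items _ _ hndacc (by intro k _; rfl)]
    rfl
  rw [pvFoldPairIf (fun e : String × String =>
        (PySem.Dict.counter ((rtl.flatMap (fun p => pvEdgeF cs p)).map Prod.fst)).getD e.1 0 > 1)
      (fun (a : PySem.Dict String (List String)) e => a.modify e.1 [] (fun l => l ++ [e.2]))
      (fun (b : PySem.Dict String (PySem.Set String)) e => b.modify e.2 PySem.Set.empty (fun s => PySem.Set.add s e.1))]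
  rw [pvFoldIf (fun e : String × String =>
        (PySem.Dict.counter ((rtl.flatMap (fun p => pvEdgeF cs p)).map Prod.fst)).getD e.1 0 > 1)
      (fun (a : PySem.Dict String (List String)) e => a.modify e.1 [] (fun l => l ++ [e.2]))]
  rw [pvFoldIf (fun e : String × String =>
        (PySem.Dict.counter ((rtl.flatMap (fun p => pvEdgeF cs p)).map Prod.fst)).getD e.1 0 > 1)
      (fun (b : PySem.Dict String (PySem.Set String)) e => b.modify e.2 PySem.Set.empty (fun s => PySem.Set.add s e.1))]
  have hcnt : ∀ p ∈ rtl,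
      (PySem.Dict.counter ((rtl.flatMap (fun p => pvEdgeF cs p)).map Prod.fst)).getD p.1 0
        = ((pvEdgeF cs p).length : Int) := by
    intro p hp
    rw [PySem.Dict.getD_counter]
    rw [pvCount_edges cs rtl hpre p hp]
  rw [pvFilter_edges cs
      (fun k => (PySem.Dict.counter ((rtl.flatMap (fun p => pvEdgeF cs p)).map Prod.fst)).getD k 0)
      rtl hcnt]
  rw [pvGroup_items (pvAccepted cs rtl) hndacc hneacc, pvLtr_fold, hitemsA]
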